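-- pv_equiv track=rewrite | github.com/cgandrey-afk/teste | funcoes.py | formatar_sequencia_visual
-- ===== SOURCE A (Python) =====
-- def formatar_sequencia_visual(lista_seq):
--     """
--     Transforma uma lista de sequências em um resumo legível.
--     Ex: [1, 2, 3, 5, 8, 9] -> "Qtd: 6 (1–3, 5, 8 e 9)"
--     Também contabiliza pacotes sem número (Adds).
--     """
--     numeros, adds = [], 0
--
--     # 1. Triagem inicial
--     for s in lista_seq:
--         s = str(s).strip()
--         # Se for vazio ou hífen, conta como pacote extra sem número (Add)
--         if not s or s == "-":
--             adds += 1
--             continue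
--
--         # Extrai apenas os dígitos para evitar erro se houver letras
--         n = "".join(filter(str.isdigit, s))
--         if n:
--             numeros.append(int(n))
--         else:
--             adds += 1
--
--     # 2. Ordenação e remoção de duplicatas
--     numeros = sorted(set(numeros))
--     partes, i = [], 0
--
--     # 3. Lógica de agrupamento de intervalos (Range)
--     while i < len(numeros):
--         ini = numeros[i]
--         fim = ini
--         # Enquanto o próximo número for a sequência exata do atual (+1)
--         while i + 1 < len(numeros) and numeros[i + 1] == fim + 1:
--             i += 1
--             fim = numeros[i]
--
--         # Formata a saída do grupo
--         if ini == fim: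
--             partes.append(f"{ini}")
--         elif fim == ini + 1:
--             partes.append(f"{ini} e {fim}")
--         else:
--             partes.append(f"{ini} ao {fim}")
--         i += 1
--
--     # 4. Construção do texto final
--     total = len(numeros) + adds
--     texto_numeros = ", ".join(partes)
--
--     if adds > 0:
--         # Se já tiver números, adiciona ", Adds: X". Se não, apenas "Adds: X"
--         if texto_numeros:
--             texto_final = f"{texto_numeros}, Adds: {adds}"
--         else:
--             texto_final = f"Adds: {adds}"
--     else:
--         texto_final = texto_numeros
--
--     return f"Qtd Pacote: {total} - Ordem: ({texto_final})"
-- ===== SOURCE B (Python) =====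
-- def _parse(item):
--     """One packet label -> its number, or None for an 'Add' (empty, '-', or no digits)."""
--     s = str(item).strip()
--     if not s or s == "-":
--         return None
--     digitos = "".join(ch for ch in s if ch.isdigit())
--     return int(digitos) if digitos else None
--
-- def formatar_sequencia_visual(lista_seq):
--     parsed = [_parse(s) for s in lista_seq]
--     adds = sum(1 for p in parsed if p is None)
--     conj = {p for p in parsed if p is not None}
--     numeros = sorted(conj)
--     partes = []
--     # hash-set consecutive-run detection: a number starts a run iff its
--     # predecessor is absent; the run's end is found by membership probes,
--     # never by scanning the sorted list for adjacency.
--     for ini in numeros: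
--         if ini - 1 in conj:
--             continue  # inside some run, not its start
--         fim = ini
--         while fim + 1 in conj:
--             fim += 1
--         if ini == fim:
--             partes.append(f"{ini}")
--         elif fim == ini + 1:
--             partes.append(f"{ini} e {fim}")
--         else:
--             partes.append(f"{ini} ao {fim}")
--     total = len(numeros) + adds
--     texto_numeros = ", ".join(partes)
--     if adds > 0:
--         texto_final = f"{texto_numeros}, Adds: {adds}" if texto_numeros else f"Adds: {adds}"
--     else:
--         texto_final = texto_numeros
--     return f"Qtd Pacote: {total} - Ordem: ({texto_final})"
-- ===== Notes on version B (the rewrite author's own statement) =====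
-- stated objective: alternative
-- what changed: Parsing becomes a per-item map to Optional[int] with adds counted by a filter, and the range grouping no longer scans the sorted list for adjacency: a number starts a run iff its predecessor is absent from the hash set, and the run's end is found by probing successive memberships (the classic consecutive-sequence set algorithm).
import Mathlib
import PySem

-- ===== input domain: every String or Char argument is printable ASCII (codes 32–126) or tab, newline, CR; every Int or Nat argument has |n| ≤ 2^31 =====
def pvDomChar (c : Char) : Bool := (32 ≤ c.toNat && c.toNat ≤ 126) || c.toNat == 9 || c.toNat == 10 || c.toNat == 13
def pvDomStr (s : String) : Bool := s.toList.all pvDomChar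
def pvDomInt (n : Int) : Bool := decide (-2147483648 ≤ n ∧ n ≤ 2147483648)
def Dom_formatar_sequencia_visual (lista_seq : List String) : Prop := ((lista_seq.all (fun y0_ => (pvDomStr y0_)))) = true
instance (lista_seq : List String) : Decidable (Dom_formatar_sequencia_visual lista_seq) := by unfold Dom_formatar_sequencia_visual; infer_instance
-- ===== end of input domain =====

-- B parses per item to Option Int and replaces A's adjacency scan of the sorted list by
-- set-membership run detection (start iff predecessor absent; end by successor probes) — alternative algorithm, same cost.

-- ===== PORT A =====

-- inner while loop: extend the run while the next number is fim + 1
def pvExtendRun (fim : Int) : List Int → Int × List Int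
  | [] => (fim, [])
  | y :: t => if y = fim + 1 then pvExtendRun y t else (fim, y :: t)

-- needed by pvGroupsA's termination argument
theorem pvExtendRun_len (l : List Int) (f : Int) : (pvExtendRun f l).2.length ≤ l.length := by
  induction l generalizing f with
  | nil => simp [pvExtendRun]
  | cons y t ih =>
    simp only [pvExtendRun]
    split
    · exact le_trans (ih y) (Nat.le_succ _)
    · simp

-- outer while loop over numeros (index i becomes the remaining suffix)
def pvGroupsA : List Int → List String
  | [] => []
  | x :: rest =>
    let p := pvExtendRun x rest
    (if x = p.1 then PySem.Int.toStr x
     else if p.1 = x + 1 then PySem.Int.toStr x ++ " e " ++ PySem.Int.toStr p.1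
     else PySem.Int.toStr x ++ " ao " ++ PySem.Int.toStr p.1) :: pvGroupsA p.2
termination_by l => l.length
decreasing_by exact Nat.lt_succ_of_le (pvExtendRun_len rest x)

def formatar_sequencia_visual (lista_seq : List String) : String :=
  -- 1. triagem: one loop accumulating (numeros, adds)
  let st := lista_seq.foldl (fun (acc : List Int × Int) item =>
      let s := PySem.Str.strip item
      if s = "" ∨ s = "-" then (acc.1, acc.2 + 1)
      else
        -- "".join(filter(str.isdigit, s)) kept as the filtered char list; int() on a
        -- nonempty all-digit string never raises, so getD 0 is never taken
        let n := (s.toList.filter PySem.Chars.isdigit)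
        if n ≠ [] then (acc.1 ++ [(PySem.Int.ofChars? n).getD 0], acc.2)
        else (acc.1, acc.2 + 1)) ([], 0)
  let numeros := PySem.List.sorted (PySem.Set.ofList st.1) (fun x => x) false
  let partes := pvGroupsA numeros
  let total := PySem.List.len numeros + st.2
  let texto_numeros := PySem.Str.join ", " partes
  let texto_final :=
    if st.2 > 0 then
      if texto_numeros ≠ "" then texto_numeros ++ ", Adds: " ++ PySem.Int.toStr st.2
      else "Adds: " ++ PySem.Int.toStr st.2
    else texto_numeros
  "Qtd Pacote: " ++ PySem.Int.toStr total ++ " - Ordem: (" ++ texto_final ++ ")"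

-- ===== PORT B =====

-- _parse: one item -> its number, or none for an 'Add'
def pvParse (item : String) : Option Int :=
  let s := PySem.Str.strip item
  if s = "" ∨ s = "-" then none
  else
    let digitos := (s.toList.filter PySem.Chars.isdigit)
    if digitos = [] then none else some ((PySem.Int.ofChars? digitos).getD 0)

-- the 'while fim + 1 in conj: fim += 1' probe; fuel = len(numeros) bounds the loop
-- (the proof shows that much fuel always suffices, since a run has at most len(numeros) members)
def pvWalk (conj : List Int) : Nat → Int → Int
  | 0, fim => fim
  | fuel + 1, fim => if (fim + 1) ∈ conj then pvWalk conj fuel (fim + 1) else fim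

-- the 'for ini in numeros' loop: skip non-starts, emit one formatted run per start
def pvGroupsB (conj : List Int) (F : Nat) : List Int → List String
  | [] => []
  | ini :: t =>
    if (ini - 1) ∈ conj then pvGroupsB conj F t
    else
      let fim := pvWalk conj F ini
      (if ini = fim then PySem.Int.toStr ini
       else if fim = ini + 1 then PySem.Int.toStr ini ++ " e " ++ PySem.Int.toStr fim
       else PySem.Int.toStr ini ++ " ao " ++ PySem.Int.toStr fim) :: pvGroupsB conj F t

def formatar_sequencia_visual_alt (lista_seq : List String) : String :=
  let parsed := lista_seq.map pvParse
  let adds : Int := ((parsed.filter (fun p => p.isNone)).length : Int)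
  let conj := PySem.Set.ofList (parsed.filterMap id)
  let numeros := PySem.List.sorted conj (fun x => x) false
  let partes := pvGroupsB conj numeros.length numeros
  let total := PySem.List.len numeros + adds
  let texto_numeros := PySem.Str.join ", " partes
  let texto_final :=
    if adds > 0 then
      if texto_numeros ≠ "" then texto_numeros ++ ", Adds: " ++ PySem.Int.toStr adds
      else "Adds: " ++ PySem.Int.toStr adds
    else texto_numeros
  "Qtd Pacote: " ++ PySem.Int.toStr total ++ " - Ordem: (" ++ texto_final ++ ")"

-- ===== PRECONDITION & SPEC =====
def Spec_formatar_sequencia_visual (lista_seq : List String) (out : String) : Prop := out = formatar_sequencia_visual_alt lista_seq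
instance (lista_seq : List String) (out : String) : Decidable (Spec_formatar_sequencia_visual lista_seq out) := by unfold Spec_formatar_sequencia_visual; infer_instance

-- ===== CLAIM (what is proved, stated in full; the proofs are below) =====
def Claim_equal_formatar_sequencia_visual : Prop := ∀ (lista_seq : List String), Dom_formatar_sequencia_visual lista_seq → Spec_formatar_sequencia_visual lista_seq (formatar_sequencia_visual lista_seq)

-- ===== LEMMAS AND PROOFS =====

-- A's triagem fold = B's map/filter/filterMap decomposition
theorem pv_fold_eq (ls : List String) (ns : List Int) (a : Int) :
    ls.foldl (fun (acc : List Int × Int) item =>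
      let s := PySem.Str.strip item
      if s = "" ∨ s = "-" then (acc.1, acc.2 + 1)
      else
        let n := (s.toList.filter PySem.Chars.isdigit)
        if n ≠ [] then (acc.1 ++ [(PySem.Int.ofChars? n).getD 0], acc.2)
        else (acc.1, acc.2 + 1)) (ns, a)
    = (ns ++ (ls.map pvParse).filterMap id,
       a + (((ls.map pvParse).filter (fun p => p.isNone)).length : Int)) := by
  induction ls generalizing ns a with
  | nil => simp
  | cons h t ih =>
    simp only [List.foldl_cons, List.map_cons]
    by_cases h1 : PySem.Str.strip h = "" ∨ PySem.Str.strip h = "-"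
    · have hp : pvParse h = none := by simp [pvParse, h1]
      simp only [if_pos h1, ih, hp]
      simp
      ring
    · by_cases h2 : (PySem.Str.strip h).toList.filter PySem.Chars.isdigit = []
      · have hp : pvParse h = none := by simp only [pvParse, if_neg h1, h2, if_pos]
        simp only [if_neg h1, h2, ne_eq, not_true_eq_false, if_false, ih, hp]
        simp
        ring
      · have hp : pvParse h = some ((PySem.Int.ofChars? ((PySem.Str.strip h).toList.filter PySem.Chars.isdigit)).getD 0) := by
          simp only [pvParse, if_neg h1, if_neg h2]
        simp only [if_neg h1, ne_eq, h2, not_false_eq_true, if_pos, ih, hp]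
        simp

-- A's inner while loop, characterised: it consumes exactly the consecutive chain
-- above x; the endpoint's successor is absent from the whole (sorted) list
theorem pvExtendRun_decomp (rest : List Int) (x : Int)
    (hpw : (x :: rest).Pairwise (· < ·)) :
    ∃ chain, rest = chain ++ (pvExtendRun x rest).2 ∧
      x ≤ (pvExtendRun x rest).1 ∧
      (∀ n : Int, (x < n ∧ n ≤ (pvExtendRun x rest).1) ↔ n ∈ chain) ∧
      ((pvExtendRun x rest).1 + 1) ∉ x :: rest ∧
      ((pvExtendRun x rest).1 - x).toNat ≤ rest.length := by
  induction rest generalizing x with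
  | nil =>
    refine ⟨[], by simp [pvExtendRun], le_refl x, ?_, ?_, by simp [pvExtendRun]⟩
    · intro n; simp [pvExtendRun]
    · simp [pvExtendRun]
  | cons y t ih =>
    simp only [List.pairwise_cons, List.mem_cons] at hpw
    by_cases h : y = x + 1
    · have hpw' : (y :: t).Pairwise (· < ·) := by
        refine List.pairwise_cons.mpr ⟨hpw.2.1, hpw.2.2⟩
      obtain ⟨chain', h1, h2, h3, h4, h5⟩ := ih y hpw'
      refine ⟨y :: chain', ?_, ?_, ?_, ?_, ?_⟩
      · simp only [pvExtendRun, if_pos h]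
        simpa using h1
      · simp only [pvExtendRun, if_pos h]
        omega
      · intro n
        simp only [pvExtendRun, if_pos h, List.mem_cons]
        rw [← h3]
        omega
      · simp only [pvExtendRun, if_pos h]
        intro hc
        rcases List.mem_cons.mp hc with hc | hc
        · omega
        · exact h4 hc
      · simp only [pvExtendRun, if_pos h, List.length_cons]
        omega
    · have hy : x < y := hpw.1 y (Or.inl rfl)
      refine ⟨[], ?_, ?_, ?_, ?_, ?_⟩
      · simp only [pvExtendRun, if_neg h]
        simp
      · simp only [pvExtendRun, if_neg h]
        exact le_rfl
      · intro n
        simp only [pvExtendRun, if_neg h]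
        simp
      · simp only [pvExtendRun, if_neg h]
        intro hc
        rcases List.mem_cons.mp hc with hc | hc
        · omega
        · rcases List.mem_cons.mp hc with hc | hc
          · exact h (hc.symm)
          · have := hpw.2.1 _ hc
            omega
      · simp only [pvExtendRun, if_neg h]
        simp

-- B's membership probe reaches exactly the run endpoint, given enough fuel
theorem pvWalk_eq (C : List Int) : ∀ (F : Nat) (x fim : Int), x ≤ fim →
    (∀ n : Int, x < n → n ≤ fim → n ∈ C) → (fim + 1) ∉ C → (fim - x).toNat ≤ F →
    pvWalk C F x = fim := by
  intro F
  induction F with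
  | zero =>
    intro x fim h1 _ _ h4
    have : x = fim := by omega
    simp [pvWalk, this]
  | succ F ih =>
    intro x fim h1 h2 h3 h4
    simp only [pvWalk]
    by_cases h : x = fim
    · subst h
      rw [if_neg h3]
    · have hx1 : x + 1 ∈ C := h2 (x + 1) (by omega) (by omega)
      rw [if_pos hx1]
      exact ih (x + 1) fim (by omega) (fun n hn1 hn2 => h2 n (by omega) hn2) h3 (by omega)

-- the for-loop skips every member of a chain whose predecessors are all present
theorem pvGroupsB_skip (C : List Int) (F : Nat) :
    ∀ (chain r : List Int), (∀ n ∈ chain, (n - 1) ∈ C) →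
      pvGroupsB C F (chain ++ r) = pvGroupsB C F r := by
  intro chain
  induction chain with
  | nil => intro r _; simp
  | cons a t ih =>
    intro r h
    simp only [List.cons_append, pvGroupsB]
    rw [if_pos (h a (List.mem_cons_self))]
    exact ih r (fun n hn => h n (List.mem_cons_of_mem a hn))

-- main invariant: on a strictly sorted suffix l whose membership agrees with C
-- above the bound b, B's start/probe loop produces A's adjacency grouping
theorem pv_groups_eq (C : List Int) (F : Nat) :
    ∀ (N : Nat) (l : List Int) (b : Int), l.length ≤ N →
      l.Pairwise (· < ·) → (∀ m ∈ l, b < m) →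
      (∀ n : Int, b ≤ n → (n ∈ C ↔ n ∈ l)) → l.length ≤ F →
      pvGroupsB C F l = pvGroupsA l := by
  intro N
  induction N with
  | zero =>
    intro l b hN _ _ _ _
    have : l = [] := List.eq_nil_of_length_eq_zero (Nat.le_zero.mp hN)
    subst this
    simp [pvGroupsA, pvGroupsB]
  | succ N ih =>
    intro l b hN hpw hb hC hF
    cases l with
    | nil => simp [pvGroupsA, pvGroupsB]
    | cons x rest =>
      obtain ⟨chain, hrest, hxle, hiff, hout, hfuel⟩ := pvExtendRun_decomp rest x hpw
      have hbx : b < x := hb x (List.mem_cons_self)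
      have hxlt : ∀ m ∈ rest, x < m := (List.pairwise_cons.mp hpw).1
      -- x is a start: x - 1 is not in C
      have hx1 : (x - 1) ∉ C := by
        intro hc
        have := (hC (x - 1) (by omega)).mp hc
        rcases List.mem_cons.mp this with h | h
        · omega
        · have := hxlt _ h; omega
      -- the probe finds the run's endpoint
      have hwalk : pvWalk C F x = (pvExtendRun x rest).1 := by
        refine pvWalk_eq C F x _ hxle ?_ ?_ (by simp at hN hF ⊢; omega)
        · intro n hn1 hn2
          refine (hC n (by omega)).mpr ?_
          exact List.mem_cons_of_mem x (hrest ▸ List.mem_append_left _ ((hiff n).mp ⟨hn1, hn2⟩))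
        · intro hc
          exact hout ((hC _ (by omega)).mp hc)
      -- every chain member has its predecessor in C, so the loop skips it
      have hskip : ∀ n ∈ chain, (n - 1) ∈ C := by
        intro n hn
        obtain ⟨hn1, hn2⟩ := (hiff n).mpr hn
        by_cases h : n - 1 = x
        · exact (hC _ (by omega)).mpr (h ▸ List.mem_cons_self)
        · refine (hC _ (by omega)).mpr ?_
          exact List.mem_cons_of_mem x
            (hrest ▸ List.mem_append_left _ ((hiff (n - 1)).mp ⟨by omega, by omega⟩))
      -- remainder facts for the inductive step
      have hpw_rest : rest.Pairwise (· < ·) := (List.pairwise_cons.mp hpw).2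
      have hpw2 : (pvExtendRun x rest).2.Pairwise (· < ·) :=
        (List.pairwise_append.mp (hrest ▸ hpw_rest)).2.1
      have hgt : ∀ m ∈ (pvExtendRun x rest).2, (pvExtendRun x rest).1 + 1 < m := by
        intro m hm
        have hmr : m ∈ rest := hrest ▸ List.mem_append_right _ hm
        have hmx : x < m := hxlt m hmr
        have hmfim : (pvExtendRun x rest).1 < m := by
          by_contra hle
          have hmchain : m ∈ chain := (hiff m).mp ⟨hmx, by omega⟩
          have := (List.pairwise_append.mp (hrest ▸ hpw_rest)).2.2 m hmchain m hm
          omega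
        have hne : m ≠ (pvExtendRun x rest).1 + 1 := by
          intro he
          exact hout (he ▸ List.mem_cons_of_mem x hmr)
        omega
      have hC2 : ∀ n : Int, (pvExtendRun x rest).1 + 1 ≤ n →
          (n ∈ C ↔ n ∈ (pvExtendRun x rest).2) := by
        intro n hn
        rw [hC n (by omega)]
        constructor
        · intro hc
          rcases List.mem_cons.mp hc with h | h
          · omega
          · rcases List.mem_append.mp (hrest ▸ h) with h | h
            · have := (hiff n).mpr h; omega
            · exact h
        · intro hc
          exact List.mem_cons_of_mem x (hrest ▸ List.mem_append_right _ hc)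
      have hlen2 : (pvExtendRun x rest).2.length ≤ rest.length := pvExtendRun_len rest x
      -- assemble
      have hrec := ih (pvExtendRun x rest).2 ((pvExtendRun x rest).1 + 1)
        (by simp at hN; omega) hpw2 hgt hC2 (by simp at hF; omega)
      have hBskip : pvGroupsB C F rest = pvGroupsB C F (pvExtendRun x rest).2 := by
        conv_lhs => rw [hrest]
        exact pvGroupsB_skip C F chain _ hskip
      rw [pvGroupsA]
      simp only [pvGroupsB, if_neg hx1, hwalk]
      rw [hBskip, hrec]

-- membership in the set and in its sorted image agree, so the invariant applies
theorem pv_top (C S : List Int) (hpw : S.Pairwise (· < ·))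
    (hmem : ∀ n : Int, n ∈ C ↔ n ∈ S) :
    pvGroupsB C S.length S = pvGroupsA S := by
  cases S with
  | nil => simp [pvGroupsA, pvGroupsB]
  | cons x t =>
    refine pv_groups_eq C (x :: t).length (x :: t).length (x :: t) (x - 1) le_rfl hpw ?_ ?_ le_rfl
    · intro m hm
      rcases List.mem_cons.mp hm with h | h
      · omega
      · have := (List.pairwise_cons.mp hpw).1 m h
        omega
    · intro n _
      exact hmem n

-- ===== VERDICT (by name: the statement is the Claim_ definition above) =====
theorem formatar_sequencia_visual_spec : Claim_equal_formatar_sequencia_visual := by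
  intro lista_seq _
  unfold Spec_formatar_sequencia_visual formatar_sequencia_visual formatar_sequencia_visual_alt
  rw [pv_fold_eq lista_seq [] 0]
  simp only [List.nil_append, zero_add]
  rw [pv_top (PySem.Set.ofList ((lista_seq.map pvParse).filterMap id))
      (PySem.List.sorted (PySem.Set.ofList ((lista_seq.map pvParse).filterMap id)) (fun x => x) false)
      (PySem.List.sorted_ofList_pairwise_lt _)
      (fun n => (PySem.List.mem_sorted _ _ _ _).symm)]
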